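-- pv_equiv track=rewrite | github.com/totalcream/BOJ_Python | CTP_2023_BRD/31847.py | precompute_dp
-- ===== SOURCE A (Python) =====
-- def precompute_dp(string):
--     n = len(string)
--     dp = [[0] * n for _ in range(n)]
--
--     # 부분 문자열의 길이를 2부터 n까지 처리
--     for length in range(1, n):  # 실제 부분 문자열의 길이는 length+1임
--         for i in range(n - length):
--             j = i + length
--             max_score = 0
--             for k in range(1, (length + 1) // 2 + 1):  # k는 1부터 (길이+1)//2까지
--                 left, right = string[i:i+k], string[j-k+1:j+1]
--                 score = sum(1 for a, b in zip(left, right) if a == b)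
--                 max_score = max(max_score, score)
--             dp[i][j] = max_score
--
--     return dp
-- ===== SOURCE B (Python) =====
-- def precompute_dp(string):
--     n = len(string)
--     # S[d] = prefix sums along diagonal d: S[d][x] = #{t < x : string[t] == string[t+d]}
--     S = []
--     for d in range(n):
--         ps = [0]
--         acc = 0
--         for t in range(n - d):
--             acc += 1 if string[t] == string[t + d] else 0
--             ps.append(acc)
--         S.append(ps)
--     dp = [[0] * n for _ in range(n)]
--     for length in range(1, n):
--         for i in range(n - length):
--             j = i + length
--             best = 0
--             for k in range(1, (length + 1) // 2 + 1):
--                 d = length - k + 1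
--                 sc = S[d][i + k] - S[d][i]
--                 if sc > best:
--                     best = sc
--             dp[i][j] = best
--     return dp
-- ===== Notes on version B (the rewrite author's own statement) =====
-- stated objective: faster
-- what changed: B precomputes, for each diagonal offset d, prefix sums of character matches along that diagonal, so each candidate overlap score is an O(1) prefix-sum difference instead of A's O(k) slice-and-zip scan.
import Mathlib
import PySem

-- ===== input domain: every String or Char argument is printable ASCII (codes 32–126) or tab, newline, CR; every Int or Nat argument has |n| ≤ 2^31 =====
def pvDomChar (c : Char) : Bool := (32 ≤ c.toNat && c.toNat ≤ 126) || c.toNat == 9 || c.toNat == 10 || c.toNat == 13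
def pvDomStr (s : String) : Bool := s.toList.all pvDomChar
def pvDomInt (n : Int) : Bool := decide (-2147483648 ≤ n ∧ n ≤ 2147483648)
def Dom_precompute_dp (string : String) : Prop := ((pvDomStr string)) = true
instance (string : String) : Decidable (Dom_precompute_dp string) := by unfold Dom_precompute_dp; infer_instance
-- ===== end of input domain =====

-- B replaces A's per-k slice-and-zip rescans with per-diagonal prefix sums of character
-- matches, making each candidate score an O(1) difference (objective: faster, O(n^4) → O(n^3)).

-- ===== PORT A =====
-- inner loop of A: max over k of the number of equal chars between string[i:i+k] and string[j-k+1:j+1]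
def pvInnerA (l : List Char) (length i : Nat) : Int :=
  (List.range' 1 ((length + 1) / 2)).foldl
    (fun max_score k =>
      max max_score
        (((PySem.List.slice l (some (i : Int)) (some ((i + k : Nat) : Int))).zip
            (PySem.List.slice l (some ((i + length - k + 1 : Nat) : Int)) (some ((i + length + 1 : Nat) : Int)))).foldl
          (fun s p => if p.1 == p.2 then s + 1 else s) (0 : Int)))
    0

def precompute_dp (string : String) : List (List Int) :=
  let l := string.toList
  let n := l.length
  let dp0 := List.replicate n (List.replicate n (0 : Int))
  (List.range' 1 (n - 1)).foldl
    (fun dp length =>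
      (List.range (n - length)).foldl
        (fun dp i => dp.set i ((dp.getD i []).set (i + length) (pvInnerA l length i)))
        dp)
    dp0

-- ===== PORT B =====
-- prefix sums along diagonal d: entry x is #{t < x : string[t] == string[t+d]}
def pvPS (l : List Char) (d : Nat) : List Int :=
  ((List.range (l.length - d)).foldl
    (fun st t =>
      (st.1 ++ [st.2 + (if l.getD t ' ' == l.getD (t + d) ' ' then (1 : Int) else 0)],
       st.2 + (if l.getD t ' ' == l.getD (t + d) ' ' then (1 : Int) else 0)))
    (([0] : List Int), (0 : Int))).1

def pvS (l : List Char) : List (List Int) :=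
  (List.range l.length).map (pvPS l)

def pvInnerB (S : List (List Int)) (length i : Nat) : Int :=
  (List.range' 1 ((length + 1) / 2)).foldl
    (fun best k =>
      if (S.getD (length - k + 1) []).getD (i + k) 0 - (S.getD (length - k + 1) []).getD i 0 > best
      then (S.getD (length - k + 1) []).getD (i + k) 0 - (S.getD (length - k + 1) []).getD i 0
      else best)
    0

def precompute_dp_alt (string : String) : List (List Int) :=
  let l := string.toList
  let n := l.length
  let S := pvS l
  let dp0 := List.replicate n (List.replicate n (0 : Int))
  (List.range' 1 (n - 1)).foldl
    (fun dp length =>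
      (List.range (n - length)).foldl
        (fun dp i => dp.set i ((dp.getD i []).set (i + length) (pvInnerB S length i)))
        dp)
    dp0

-- ===== PRECONDITION & SPEC =====
def Spec_precompute_dp (string : String) (out : List (List Int)) : Prop := out = precompute_dp_alt string
instance (string : String) (out : List (List Int)) : Decidable (Spec_precompute_dp string out) := by unfold Spec_precompute_dp; infer_instance

-- ===== CLAIM (what is proved, stated in full; the proofs are below) =====
def Claim_equal_precompute_dp : Prop := ∀ (string : String), Dom_precompute_dp string → Spec_precompute_dp string (precompute_dp string)

-- ===== LEMMAS AND PROOFS =====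

-- closed form of the diagonal prefix sums
def pvF (l : List Char) (d x : Nat) : Int :=
  ((List.range x).countP (fun t => l.getD t ' ' == l.getD (t + d) ' ') : Int)

theorem pvF_succ (l : List Char) (d x : Nat) :
    pvF l d (x + 1) = pvF l d x + (if l.getD x ' ' == l.getD (x + d) ' ' then (1 : Int) else 0) := by
  simp [pvF, List.range_succ, List.countP_append, List.countP_cons]

theorem pvPS_foldl (l : List Char) (d m : Nat) :
    (List.range m).foldl
      (fun (st : List Int × Int) t =>
        (st.1 ++ [st.2 + (if l.getD t ' ' == l.getD (t + d) ' ' then (1 : Int) else 0)],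
         st.2 + (if l.getD t ' ' == l.getD (t + d) ' ' then (1 : Int) else 0)))
      (([0] : List Int), (0 : Int))
    = ((List.range (m + 1)).map (pvF l d), pvF l d m) := by
  induction m with
  | zero => simp [pvF]
  | succ m ih =>
      rw [List.range_succ, List.foldl_append, ih]
      simp only [List.foldl_cons, List.foldl_nil]
      rw [List.range_succ (n := m + 1), List.map_append]
      simp [pvF_succ]

theorem pvPS_getD (l : List Char) (d x : Nat) (hx : x ≤ l.length - d) :
    (pvPS l d).getD x 0 = pvF l d x := by
  unfold pvPS
  rw [pvPS_foldl]
  exact PySem.List.getD_map_range _ _ _ _ (by omega)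

-- the score of A's slice-and-zip scan is a prefix-sum difference along diagonal d
theorem pvScore_eq (l : List Char) (d : Nat) :
    ∀ (k i : Nat), i + k + d ≤ l.length →
    ((((l.drop i).take k).zip ((l.drop (i + d)).take k)).countP (fun p => p.1 == p.2) : Int)
      = pvF l d (i + k) - pvF l d i := by
  intro k
  induction k with
  | zero => intro i h; simp
  | succ k ih =>
      intro i h
      have hi : i < l.length := by omega
      have hid : i + d < l.length := by omega
      rw [List.drop_eq_getElem_cons hi, List.drop_eq_getElem_cons hid]
      simp only [List.take_succ_cons, List.zip_cons_cons, List.countP_cons]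
      have hrest := ih (i + 1) (by omega)
      have harr : i + 1 + d = i + d + 1 := by omega
      rw [harr] at hrest
      have hF := pvF_succ l d i
      rw [List.getD_eq_getElem l ' ' hi, List.getD_eq_getElem l ' ' hid] at hF
      have hshift : i + 1 + k = i + (k + 1) := by omega
      rw [hshift] at hrest
      by_cases hc : (l[i] == l[i + d]) = true <;>
        simp only [hc, if_true, if_false, Bool.false_eq_true] at hF ⊢ <;>
        push_cast <;> omega

-- per-cell equality of the two inner loops
theorem pvInner_eq (l : List Char) (length i : Nat)
    (h1 : 1 ≤ length) (h2 : length < l.length) (h3 : i < l.length - length) :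
    pvInnerA l length i = pvInnerB (pvS l) length i := by
  unfold pvInnerA pvInnerB
  apply PySem.List.foldl_congr_mem
  intro acc k hk
  rw [List.mem_range'_1] at hk
  obtain ⟨hk1, hk2⟩ := hk
  have hkl : k ≤ length := by omega
  set n := l.length with hn
  set d := length - k + 1 with hd
  -- B side lookups
  have hSd : (pvS l).getD d [] = pvPS l d := by
    unfold pvS; exact PySem.List.getD_map_range _ _ _ _ (by omega)
  rw [hSd, pvPS_getD l d (i + k) (by omega), pvPS_getD l d i (by omega)]
  -- A side slices
  have hcast : ((i + k : Nat) : Int) = ((i : Nat) : Int) + ((k : Nat) : Int) := by push_cast; ring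
  rw [hcast, PySem.List.slice_natCast_add, PySem.List.slice_natCast]
  have ha : i + length - k + 1 = i + d := by omega
  have hb : (i + length + 1) - (i + d) = k := by omega
  rw [ha, hb]
  rw [PySem.List.foldl_count_if]
  rw [pvScore_eq l d k i (by omega)]
  simp only [Int.zero_add]
  by_cases hgt : pvF l d (i + k) - pvF l d i > acc
  · rw [if_pos hgt, max_eq_right (le_of_lt hgt)]
  · rw [if_neg hgt, max_eq_left (by omega)]

-- ===== VERDICT (by name: the statement is the Claim_ definition above) =====
theorem precompute_dp_spec : Claim_equal_precompute_dp := by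
  intro string _
  unfold Spec_precompute_dp precompute_dp precompute_dp_alt
  apply PySem.List.foldl_congr_mem
  intro dp length hlen
  rw [List.mem_range'_1] at hlen
  apply PySem.List.foldl_congr_mem
  intro dp' i hi
  rw [List.mem_range] at hi
  rw [pvInner_eq string.toList length i (by omega) (by omega) (by omega)]
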